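-- pv_equiv track=rewrite | github.com/Nuno23C/LA2 | Treino 1/robot.py | robot
-- ===== SOURCE A (Python) =====
-- def robot(comandos):
--     movimentos = {
--         0 : (0,1),    # Cima
--         1 : (1,0),    # Direita
--         2 : (0,-1),   # Baixo
--         3 : (-1,0)    # Esquerda
--     }
--     viradoPara = 0
--     pos = [0,0]   # (x,y)
--     max_X = 0
--     min_X = 0
--     max_Y = 0
--     min_Y = 0
--     r = []
--
--     for comando in comandos :
--         if comando == 'A' :
--             pos[0] += movimentos[viradoPara][0]
--             pos[1] += movimentos[viradoPara][1]
--             if(pos[0] > max_X) :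
--                 max_X = pos[0]
--             elif(pos[0] < min_X) :
--                 min_X = pos[0]
--             if (pos[1] > max_Y) :
--                 max_Y = pos[1]
--             elif(pos[1] < min_Y) :
--                 min_Y = pos[1]
--         elif comando == 'E' :
--             viradoPara = (viradoPara - 1) % 4
--         elif comando == 'D' :
--             viradoPara = (viradoPara + 1) % 4
--         else :
--             r.append((min_X,min_Y,max_X,max_Y))
--             max_X = 0
--             max_Y = 0
--             min_X = 0
--             min_Y = 0
--             pos[0] = 0
--             pos[1] = 0
--             viradoPara = 0
--
--     return r
-- ===== SOURCE B (Python) =====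
-- def robot(comandos):
--     # Heading as a complex number (up = 1j); per-segment list of visited
--     # positions seeded with the origin, reduced to a bbox at each terminator.
--     res = []
--     heading, pos, seg = 1j, 0j, [0j]
--     for c in comandos:
--         if c == 'A':
--             pos += heading
--             seg.append(pos)
--         elif c == 'E':
--             heading *= 1j
--         elif c == 'D':
--             heading *= -1j
--         else:
--             res.append((int(min(p.real for p in seg)),
--                         int(min(p.imag for p in seg)),
--                         int(max(p.real for p in seg)),
--                         int(max(p.imag for p in seg))))
--             heading, pos, seg = 1j, 0j, [0j]
--     return res
-- ===== Notes on version B (the rewrite author's own statement) =====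
-- stated objective: alternative
-- what changed: Replaced the direction-index dict and running min/max bookkeeping with a complex-number heading rotated by multiplying by ±1j and a per-segment list of visited positions (seeded with the origin) reduced to the bounding box only at each terminator command.
import Mathlib
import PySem

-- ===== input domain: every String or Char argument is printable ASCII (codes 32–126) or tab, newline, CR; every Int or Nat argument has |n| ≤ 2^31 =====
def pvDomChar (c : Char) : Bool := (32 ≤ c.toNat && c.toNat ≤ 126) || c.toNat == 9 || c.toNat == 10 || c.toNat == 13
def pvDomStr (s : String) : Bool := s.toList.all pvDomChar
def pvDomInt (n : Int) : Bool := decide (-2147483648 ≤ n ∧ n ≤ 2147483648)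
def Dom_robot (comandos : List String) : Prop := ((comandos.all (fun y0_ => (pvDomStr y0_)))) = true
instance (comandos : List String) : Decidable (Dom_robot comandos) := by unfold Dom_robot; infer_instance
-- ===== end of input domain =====

-- B replaces A's direction-index dict and running min/max bookkeeping by a complex-number
-- heading (here an Int pair) and a per-segment list of visited positions reduced to a bbox
-- at each terminator (objective: alternative decomposition, similar cost).

-- ===== PORT A =====
def robotMov : PySem.Dict Int (Int × Int) :=
  PySem.Dict.ofList [(0, (0, 1)), (1, (1, 0)), (2, (0, -1)), (3, (-1, 0))]

def robotLoop : List String → Int → Int → Int → Int → Int → Int → Int →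
    List (Int × Int × Int × Int) → List (Int × Int × Int × Int)
  | [], _, _, _, _, _, _, _, r => r
  | c :: cs, v, px, py, maxX, minX, maxY, minY, r =>
    if c = "A" then
      -- movimentos[viradoPara]: the key is always 0..3, so the default is unreachable
      let m := (robotMov.get? v).getD (0, 0)
      let px := px + m.1
      let py := py + m.2
      let sx := if px > maxX then (px, minX) else if px < minX then (maxX, px) else (maxX, minX)
      let sy := if py > maxY then (py, minY) else if py < minY then (maxY, py) else (maxY, minY)
      robotLoop cs v px py sx.1 sx.2 sy.1 sy.2 r
    else if c = "E" then
      robotLoop cs (PySem.Int.mod (v - 1) 4) px py maxX minX maxY minY r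
    else if c = "D" then
      robotLoop cs (PySem.Int.mod (v + 1) 4) px py maxX minX maxY minY r
    else
      robotLoop cs 0 0 0 0 0 0 0 (r ++ [(minX, minY, maxX, maxY)])

def robot (comandos : List String) : List (Int × Int × Int × Int) :=
  robotLoop comandos 0 0 0 0 0 0 0 []

-- ===== PORT B =====
-- min(...)/max(...) over a nonempty list of ints (the default is unreachable: seg ≠ [])
def minI (xs : List Int) : Int := (PySem.List.min? xs (fun y => y)).getD 0
def maxI (xs : List Int) : Int := (PySem.List.max? xs (fun y => y)).getD 0

def robotAltLoop : List String → Int × Int → Int × Int → List (Int × Int) →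
    List (Int × Int × Int × Int) → List (Int × Int × Int × Int)
  | [], _, _, _, res => res
  | c :: cs, h, p, seg, res =>
    if c = "A" then
      let p := (p.1 + h.1, p.2 + h.2)
      robotAltLoop cs h p (seg ++ [p]) res
    else if c = "E" then
      robotAltLoop cs (-h.2, h.1) p seg res      -- heading *= 1j
    else if c = "D" then
      robotAltLoop cs (h.2, -h.1) p seg res      -- heading *= -1j
    else
      let box := (minI (seg.map Prod.fst), minI (seg.map Prod.snd),
                  maxI (seg.map Prod.fst), maxI (seg.map Prod.snd))
      robotAltLoop cs (0, 1) (0, 0) [(0, 0)] (res ++ [box])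

def robot_alt (comandos : List String) : List (Int × Int × Int × Int) :=
  robotAltLoop comandos (0, 1) (0, 0) [(0, 0)] []

-- ===== PRECONDITION & SPEC =====
def Spec_robot (comandos : List String) (out : List (Int × Int × Int × Int)) : Prop := out = robot_alt comandos
instance (comandos : List String) (out : List (Int × Int × Int × Int)) : Decidable (Spec_robot comandos out) := by unfold Spec_robot; infer_instance

-- ===== CLAIM (what is proved, stated in full; the proofs are below) =====
def Claim_equal_robot : Prop := ∀ (comandos : List String), Dom_robot comandos → Spec_robot comandos (robot comandos)

-- ===== LEMMAS AND PROOFS =====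
def dirOf (v : Int) : Int × Int :=
  if v = 0 then (0, 1) else if v = 1 then (1, 0) else if v = 2 then (0, -1) else (-1, 0)

theorem minI_append (xs : List Int) (a : Int) (h : xs ≠ []) :
    minI (xs ++ [a]) = min (minI xs) a := by
  cases xs with
  | nil => exact absurd rfl h
  | cons x t =>
    simp [minI, PySem.List.min?_id_cons, List.foldl_append]

theorem maxI_append (xs : List Int) (a : Int) (h : xs ≠ []) :
    maxI (xs ++ [a]) = max (maxI xs) a := by
  cases xs with
  | nil => exact absurd rfl h
  | cons x t =>
    simp [maxI, PySem.List.max?_id_cons, List.foldl_append]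

theorem updMinMax (mx mn p : Int) (h : mn ≤ mx) :
    (if p > mx then (p, mn) else if p < mn then (mx, p) else (mx, mn))
      = (max mx p, min mn p) := by
  split_ifs <;> simp [Prod.ext_iff] <;> omega

theorem loop_eq : ∀ (cs : List String) (v px py mx mnx my mny : Int)
    (r : List (Int × Int × Int × Int)) (h : Int × Int) (seg : List (Int × Int)),
    0 ≤ v → v < 4 → h = dirOf v → seg ≠ [] →
    minI (seg.map Prod.fst) = mnx → minI (seg.map Prod.snd) = mny →
    maxI (seg.map Prod.fst) = mx → maxI (seg.map Prod.snd) = my →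
    mnx ≤ mx → mny ≤ my →
    robotLoop cs v px py mx mnx my mny r = robotAltLoop cs h (px, py) seg r := by
  intro cs
  induction cs with
  | nil => intros; rfl
  | cons c cs ih =>
    intro v px py mx mnx my mny r h seg hv0 hv4 hh hne hmnx hmny hmx hmy hx hy
    by_cases hA : c = "A"
    · have hmov : (robotMov.get? v).getD (0, 0) = dirOf v := by
        interval_cases v <;> decide
      have h1 : seg.map Prod.fst ≠ [] := by simpa using hne
      have h2 : seg.map Prod.snd ≠ [] := by simpa using hne
      simp only [robotLoop, robotAltLoop, if_pos hA, hmov, hh]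
      rw [updMinMax _ _ _ hx, updMinMax _ _ _ hy]
      refine ih v _ _ _ _ _ _ r (dirOf v) (seg ++ [(px + (dirOf v).1, py + (dirOf v).2)])
        hv0 hv4 rfl (by simp) ?_ ?_ ?_ ?_ ?_ ?_
      · simp [minI_append _ _ h1, hmnx]
      · simp [minI_append _ _ h2, hmny]
      · simp [maxI_append _ _ h1, hmx]
      · simp [maxI_append _ _ h2, hmy]
      · omega
      · omega
    · by_cases hE : c = "E"
      · have hd : 0 ≤ PySem.Int.mod (v - 1) 4 ∧ PySem.Int.mod (v - 1) 4 < 4 ∧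
            dirOf (PySem.Int.mod (v - 1) 4) = (-(dirOf v).2, (dirOf v).1) := by
          interval_cases v <;> refine ⟨by decide, by decide, by decide⟩
        simp only [robotLoop, robotAltLoop, if_neg hA, if_pos hE]
        rw [hh]
        exact ih _ _ _ _ _ _ _ r _ seg hd.1 hd.2.1 hd.2.2.symm hne hmnx hmny hmx hmy hx hy
      · by_cases hD : c = "D"
        · have hd : 0 ≤ PySem.Int.mod (v + 1) 4 ∧ PySem.Int.mod (v + 1) 4 < 4 ∧
              dirOf (PySem.Int.mod (v + 1) 4) = ((dirOf v).2, -(dirOf v).1) := by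
            interval_cases v <;> refine ⟨by decide, by decide, by decide⟩
          simp only [robotLoop, robotAltLoop, if_neg hA, if_neg hE, if_pos hD]
          rw [hh]
          exact ih _ _ _ _ _ _ _ r _ seg hd.1 hd.2.1 hd.2.2.symm hne hmnx hmny hmx hmy hx hy
        · simp only [robotLoop, robotAltLoop, if_neg hA, if_neg hE, if_neg hD]
          rw [hmnx, hmny, hmx, hmy]
          exact ih 0 0 0 0 0 0 0 _ (0, 1) [(0, 0)] (by decide) (by decide) (by decide)
            (by decide) (by decide) (by decide) (by decide) (by decide) le_rfl le_rfl

-- ===== VERDICT (by name: the statement is the Claim_ definition above) =====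
theorem robot_spec : Claim_equal_robot := by
  intro comandos _
  unfold Spec_robot robot robot_alt
  exact loop_eq comandos 0 0 0 0 0 0 0 [] (0, 1) [(0, 0)] (by decide) (by decide)
    (by decide) (by decide) (by decide) (by decide) (by decide) (by decide) le_rfl le_rfl
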